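-- pv_equiv track=rewrite | github.com/learn-burn-code-123/speech-learning-app | generate_numbers.py | generate_dots
-- ===== SOURCE A (Python) =====
-- def generate_dots(num):
--     if num == 0:
--         return ""
--
--     dots = []
--     radius = 6 if num > 10 else 8  # Smaller dots for larger numbers
--
--     if num <= 10:
--         # Original pattern for 1-10
--         if num <= 3:
--             # Single row for 1-3
--             start_x = 100 - (num * 20) + 20
--             for i in range(num):
--                 dots.append(f'<circle cx="{start_x + i*40}" cy="140" r="{radius}" fill="black"/>')
--         elif num <= 6:
--             # Two rows for 4-6
--             per_row = (num + 1) // 2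
--             for row in range(2):
--                 dots_in_row = min(per_row, num - row * per_row)
--                 start_x = 100 - (dots_in_row * 20) + 20
--                 for i in range(dots_in_row):
--                     dots.append(f'<circle cx="{start_x + i*40}" cy="{130 + row*20}" r="{radius}" fill="black"/>')
--         else:
--             # Three rows for 7-10
--             per_row = (num + 2) // 3
--             for row in range(3):
--                 dots_in_row = min(per_row, num - row * per_row)
--                 start_x = 100 - (dots_in_row * 20) + 20
--                 for i in range(dots_in_row):
--                     dots.append(f'<circle cx="{start_x + i*40}" cy="{120 + row*20}" r="{radius}" fill="black"/>')
--     else: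
--         # For numbers 11-20, show 10 dots plus remaining dots in a special pattern
--         # First, show 10 dots in a compact 2x5 grid
--         for row in range(2):
--             for col in range(5):
--                 dots.append(f'<circle cx="{60 + col*30}" cy="{125 + row*15}" r="{radius}" fill="black"/>')
--
--         # Then show remaining dots (num - 10) in a row below
--         remaining = num - 10
--         start_x = 100 - (remaining * 15) + 15
--         for i in range(remaining):
--             dots.append(f'<circle cx="{start_x + i*30}" cy="155" r="{radius}" fill="black"/>')
--
--     return "\n    ".join(dots)
-- ===== SOURCE B (Python) =====
-- def _dot_pos(num, k):
--     # Closed-form position of dot k (0-based) for a display of num dots.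
--     if num <= 10:
--         rows = 1 if num <= 3 else 2 if num <= 6 else 3
--         per = (num + rows - 1) // rows
--         row, col = divmod(k, per)
--         cnt = min(per, num - row * per)
--         return (100 - cnt * 20 + 20 + col * 40, 150 - rows * 10 + row * 20)
--     if k < 10:
--         row, col = divmod(k, 5)
--         return (60 + col * 30, 125 + row * 15)
--     rem = num - 10
--     return (100 - rem * 15 + 15 + (k - 10) * 30, 155)
--
-- def generate_dots(num):
--     if num == 0:
--         return ""
--     r = 6 if num > 10 else 8
--     parts = []
--     for k in range(num):
--         cx, cy = _dot_pos(num, k)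
--         parts.append('<circle cx="%d" cy="%d" r="%d" fill="black"/>' % (cx, cy, r))
--     return "\n    ".join(parts)
-- ===== Notes on version B (the rewrite author's own statement) =====
-- stated objective: alternative
-- what changed: Replaced A's four branch-specific nested row loops by a closed-form per-dot position function (row/col computed arithmetically from the dot index via divmod) driven by one flat loop over dot indices 0..num-1.
import Mathlib
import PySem

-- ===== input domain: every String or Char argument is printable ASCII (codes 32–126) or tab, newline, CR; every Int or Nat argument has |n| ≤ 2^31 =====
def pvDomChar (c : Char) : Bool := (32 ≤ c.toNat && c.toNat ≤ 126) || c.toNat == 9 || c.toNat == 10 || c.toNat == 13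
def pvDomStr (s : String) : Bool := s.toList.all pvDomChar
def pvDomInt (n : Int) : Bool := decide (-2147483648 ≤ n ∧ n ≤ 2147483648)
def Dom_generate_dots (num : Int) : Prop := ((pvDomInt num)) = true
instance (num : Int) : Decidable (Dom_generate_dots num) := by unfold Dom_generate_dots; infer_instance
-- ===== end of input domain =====

-- B replaces A's per-branch row loops by a closed-form per-dot position function driven by one flat loop over dot indices — objective: alternative decomposition, same cost.

-- ===== PORT A =====
-- A's f-string '<circle cx="…" cy="…" r="…" fill="black"/>' (str() of each interpolated int)
def pvCircA (cx cy r : Int) : String :=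
  "<circle cx=\"" ++ PySem.Int.toStr cx ++ "\" cy=\"" ++ PySem.Int.toStr cy ++
  "\" r=\"" ++ PySem.Int.toStr r ++ "\" fill=\"black\"/>"

def generate_dots (num : Int) : String :=
  if num == 0 then "" else
  let radius : Int := if num > 10 then 6 else 8
  let dots : List String :=
    if num ≤ 10 then
      if num ≤ 3 then
        let start_x := 100 - num * 20 + 20
        (PySem.List.pyRange 0 num 1).foldl
          (fun d i => d ++ [pvCircA (start_x + i * 40) 140 radius]) []
      else if num ≤ 6 then
        let per_row := PySem.Int.floordiv (num + 1) 2
        (PySem.List.pyRange 0 2 1).foldl (fun d row =>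
          let dots_in_row := min per_row (num - row * per_row)
          let start_x := 100 - dots_in_row * 20 + 20
          (PySem.List.pyRange 0 dots_in_row 1).foldl
            (fun d i => d ++ [pvCircA (start_x + i * 40) (130 + row * 20) radius]) d) []
      else
        let per_row := PySem.Int.floordiv (num + 2) 3
        (PySem.List.pyRange 0 3 1).foldl (fun d row =>
          let dots_in_row := min per_row (num - row * per_row)
          let start_x := 100 - dots_in_row * 20 + 20
          (PySem.List.pyRange 0 dots_in_row 1).foldl
            (fun d i => d ++ [pvCircA (start_x + i * 40) (120 + row * 20) radius]) d) []
    else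
      let d10 := (PySem.List.pyRange 0 2 1).foldl (fun d row =>
        (PySem.List.pyRange 0 5 1).foldl
          (fun d col => d ++ [pvCircA (60 + col * 30) (125 + row * 15) radius]) d) []
      let remaining := num - 10
      let start_x := 100 - remaining * 15 + 15
      (PySem.List.pyRange 0 remaining 1).foldl
        (fun d i => d ++ [pvCircA (start_x + i * 30) 155 radius]) d10
  PySem.Str.join "\n    " dots

-- ===== PORT B =====
-- B's per-dot position helper _dot_pos (closed-form row/col from the dot index via divmod)
def pvDotPos (num k : Int) : Int × Int :=
  if num ≤ 10 then
    let rows : Int := if num ≤ 3 then 1 else if num ≤ 6 then 2 else 3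
    let per := PySem.Int.floordiv (num + rows - 1) rows
    let row := PySem.Int.floordiv k per
    let col := PySem.Int.mod k per
    let cnt := min per (num - row * per)
    (100 - cnt * 20 + 20 + col * 40, 150 - rows * 10 + row * 20)
  else if k < 10 then
    let row := PySem.Int.floordiv k 5
    let col := PySem.Int.mod k 5
    (60 + col * 30, 125 + row * 15)
  else
    let rem := num - 10
    (100 - rem * 15 + 15 + (k - 10) * 30, 155)

-- B's circle %-format string is character-for-character A's; pvCircA is that shared literal formatter.
def generate_dots_alt (num : Int) : String :=
  if num == 0 then "" else
  let r : Int := if num > 10 then 6 else 8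
  let parts := (PySem.List.pyRange 0 num 1).foldl (fun ps k =>
    let p := pvDotPos num k
    ps ++ [pvCircA p.1 p.2 r]) []
  PySem.Str.join "\n    " parts

-- ===== PRECONDITION & SPEC =====
def Spec_generate_dots (num : Int) (out : String) : Prop := out = generate_dots_alt num
instance (num : Int) (out : String) : Decidable (Spec_generate_dots num out) := by unfold Spec_generate_dots; infer_instance

-- ===== CLAIM (what is proved, stated in full; the proofs are below) =====
def Claim_equal_generate_dots : Prop := ∀ (num : Int), Dom_generate_dots num → Spec_generate_dots num (generate_dots num)

-- ===== LEMMAS AND PROOFS =====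
theorem pv_foldl_append_map {α β : Type} (l : List α) (f : α → β) (init : List β) :
    l.foldl (fun d i => d ++ [f i]) init = init ++ l.map f := by
  induction l generalizing init with
  | nil => simp
  | cons x xs ih => simp [List.foldl, ih]

theorem pv_big (num : Int) (h : 10 < num) :
    generate_dots num = generate_dots_alt num := by
  have hb : (num == 0) = false := by simp; omega
  have hng : ¬ num ≤ 10 := by omega
  have r2 : PySem.List.pyRange 0 2 1 = [0,1] := by decide
  have r5 : PySem.List.pyRange 0 5 1 = [0,1,2,3,4] := by decide
  have rsplit : PySem.List.pyRange 0 num 1 = PySem.List.pyRange 0 10 1 ++ PySem.List.pyRange 10 num 1 :=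
    PySem.List.pyRange_one_append 0 10 num (by omega) (by omega)
  have r10 : PySem.List.pyRange 0 10 1 = [0,1,2,3,4,5,6,7,8,9] := by decide
  simp only [generate_dots, generate_dots_alt, hb, hng, h, if_true, if_false,
    Bool.false_eq_true, rsplit, r2, r5, r10, List.foldl_cons, List.foldl_nil,
    List.foldl_append, pv_foldl_append_map]
  norm_num [pvDotPos, hng]
  rw [PySem.List.pyRange_one 10 num, PySem.List.pyRange_one 0 (num - 10)]
  refine congrArg _ ?_
  simp only [List.map_map, List.cons.injEq, true_and, sub_zero]
  apply List.map_congr_left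
  intro k _
  have hk : ¬ ((10:Int) + (k:Int) < 10) := by omega
  simp only [Function.comp, hk, if_false]
  norm_num

theorem pv_small (num : Int) (h0 : num ≠ 0) (h : num ≤ 10) :
    generate_dots num = generate_dots_alt num := by
  by_cases hneg : num < 0
  · have e : PySem.List.pyRange 0 num 1 = [] := PySem.List.pyRange_one_eq_nil (by omega)
    have hb : (num == 0) = false := by simp [h0]
    simp [generate_dots, generate_dots_alt, hb, e, show num ≤ 3 by omega, h,
      show ¬(10:Int) < num by omega]
  · have h1 : 1 ≤ num := by omega
    have r2 : PySem.List.pyRange 0 2 1 = [0,1] := by decide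
    have r3 : PySem.List.pyRange 0 3 1 = [0,1,2] := by decide
    have t1 : (1:Int).toNat = 1 := rfl
    have t2 : (2:Int).toNat = 2 := rfl
    have t3 : (3:Int).toNat = 3 := rfl
    have t4 : (4:Int).toNat = 4 := rfl
    have t5 : (5:Int).toNat = 5 := rfl
    have t6 : (6:Int).toNat = 6 := rfl
    have t7 : (7:Int).toNat = 7 := rfl
    have t8 : (8:Int).toNat = 8 := rfl
    have t9 : (9:Int).toNat = 9 := rfl
    have t10 : (10:Int).toNat = 10 := rfl
    interval_cases num <;>
      simp only [generate_dots, generate_dots_alt, pvDotPos] <;>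
      norm_num [r2, r3, t1, t2, t3, t4, t5, t6, t7, t8, t9, t10,
        PySem.List.pyRange_one, List.range_succ,
        PySem.Int.floordiv_eq_ediv_of_pos, PySem.Int.mod_eq_emod_of_pos]

-- ===== VERDICT (by name: the statement is the Claim_ definition above) =====
theorem generate_dots_spec : Claim_equal_generate_dots := by
  intro num hd
  unfold Spec_generate_dots
  by_cases h0 : num = 0
  · subst h0; rfl
  · by_cases h10 : num ≤ 10
    · exact pv_small num h0 h10
    · exact pv_big num (by omega)
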